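-- pv_equiv track=rewrite | github.com/MProductionsmado/mode-N | src/data/preprocessing.py | _extract_materials
-- ===== SOURCE A (Python) =====
-- from typing import Dict, List, Tuple, Optional
--
-- def _extract_materials(tags: List[str]) -> List[str]:
--     """Extract material tags from tag list"""
--     materials = []
--     material_keywords = [
--         'oak', 'birch', 'spruce', 'acacia', 'dark_oak', 'jungle',
--         'wood', 'log', 'leaves', 'planks',
--         'stone', 'cobblestone', 'dirt', 'grass'
--     ]
--
--     for tag in tags:
--         if any(keyword in tag.lower() for keyword in material_keywords):
--             materials.append(tag)
--
--     return materials
-- ===== SOURCE B (Python) =====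
-- # B: position-major scan — for each lowered tag, walk its positions once and ask
-- # whether any keyword starts there, instead of A's keyword-major `k in t` loop.
-- def _extract_materials(tags):
--     """Extract material tags from tag list"""
--     material_keywords = [
--         'oak', 'birch', 'spruce', 'acacia', 'dark_oak', 'jungle',
--         'wood', 'log', 'leaves', 'planks',
--         'stone', 'cobblestone', 'dirt', 'grass'
--     ]
--
--     def is_material(tag):
--         t = tag.lower()
--         return any(t.startswith(k, i)
--                    for i in range(len(t))
--                    for k in material_keywords)
--
--     return [tag for tag in tags if is_material(tag)]
-- ===== Notes on version B (the rewrite author's own statement) =====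
-- stated objective: alternative
-- what changed: Replaces A's keyword-major test (any(keyword in tag.lower() ...)) by a position-major scan: walk the lowered tag's positions once and ask at each position whether some keyword starts there, collecting matches with a filter/comprehension instead of an append loop.
import Mathlib
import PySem

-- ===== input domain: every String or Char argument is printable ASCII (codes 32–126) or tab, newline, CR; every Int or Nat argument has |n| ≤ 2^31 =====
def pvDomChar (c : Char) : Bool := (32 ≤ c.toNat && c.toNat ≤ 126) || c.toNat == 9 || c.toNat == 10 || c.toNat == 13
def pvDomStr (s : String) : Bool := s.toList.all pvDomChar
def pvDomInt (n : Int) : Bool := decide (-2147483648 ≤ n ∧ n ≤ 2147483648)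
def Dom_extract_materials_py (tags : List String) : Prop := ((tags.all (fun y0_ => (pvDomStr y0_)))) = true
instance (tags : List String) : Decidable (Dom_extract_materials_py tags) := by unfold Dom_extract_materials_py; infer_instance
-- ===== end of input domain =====

-- B replaces A's keyword-major `k in t` test by a position-major scan of the lowered
-- tag (at each position, does some keyword start there?), and a filter instead of an
-- append loop; alternative structure, same cost.


-- the shared keyword literal from the Python source
def pvKeywords : List String :=
  ["oak", "birch", "spruce", "acacia", "dark_oak", "jungle",
   "wood", "log", "leaves", "planks",
   "stone", "cobblestone", "dirt", "grass"]

-- ===== PORT A =====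
-- for tag in tags: if any(keyword in tag.lower() for keyword in material_keywords): materials.append(tag)
def extract_materials_py (tags : List String) : List String :=
  tags.foldl
    (fun materials tag =>
      if pvKeywords.any (fun keyword => PySem.Str.isIn keyword (PySem.Str.lower tag)) then
        materials ++ [tag]
      else materials)
    []

-- ===== PORT B =====
-- is_material: t = tag.lower(); any(t.startswith(k, i) for i in range(len(t)) for k in keywords)
-- t.startswith(k, i) with 0 ≤ i ≤ len(t) is exactly: k is a prefix of t[i:], ported as
-- PySem.Chars.startswith (t.drop i) k.
def pvIsMaterial (tag : String) : Bool :=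
  let t := (PySem.Str.lower tag).toList
  (List.range t.length).any (fun i =>
    pvKeywords.any (fun k => PySem.Chars.startswith (t.drop i) k.toList))

def extract_materials_py_alt (tags : List String) : List String :=
  tags.filter (fun tag => pvIsMaterial tag)

-- ===== PRECONDITION & SPEC =====
def Spec_extract_materials_py (tags : List String) (out : List String) : Prop := out = extract_materials_py_alt tags
instance (tags : List String) (out : List String) : Decidable (Spec_extract_materials_py tags out) := by unfold Spec_extract_materials_py; infer_instance

-- ===== CLAIM (what is proved, stated in full; the proofs are below) =====
def Claim_equal_extract_materials_py : Prop := ∀ (tags : List String), Dom_extract_materials_py tags → Spec_extract_materials_py tags (extract_materials_py tags)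

-- ===== LEMMAS AND PROOFS =====

-- every keyword is nonempty
theorem pvKeywords_ne_nil : ∀ k ∈ pvKeywords, k.toList ≠ [] := by decide

-- a nonempty sub is an infix of t iff it is a prefix of some drop at a position < length
theorem infix_iff_prefix_drop_lt {sub t : List Char} (hsub : sub ≠ []) :
    sub <:+: t ↔ ∃ i < t.length, sub <+: t.drop i := by
  constructor
  · rintro ⟨p, s, rfl⟩
    have hpos : 0 < sub.length := List.length_pos_of_ne_nil hsub
    refine ⟨p.length, ?_, ?_⟩
    · simp only [List.length_append]; omega
    · rw [List.append_assoc, List.drop_left]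
      exact List.prefix_append sub s
  · rintro ⟨i, _, hpre⟩
    exact hpre.isInfix.trans (List.drop_suffix i t).isInfix

-- per-tag: A's membership test equals B's position scan
theorem cond_eq (tag : String) :
    pvKeywords.any (fun keyword => PySem.Str.isIn keyword (PySem.Str.lower tag))
      = pvIsMaterial tag := by
  unfold pvIsMaterial
  simp only [PySem.Str.isIn_eq, PySem.Chars.startswith]
  rw [Bool.eq_iff_iff]
  simp only [List.any_eq_true, List.mem_range]
  constructor
  · rintro ⟨k, hk, hin⟩
    rw [PySem.Chars.isIn_iff_infix, infix_iff_prefix_drop_lt (pvKeywords_ne_nil k hk)] at hin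
    obtain ⟨i, hi, hp⟩ := hin
    exact ⟨i, hi, k, hk, List.isPrefixOf_iff_prefix.mpr hp⟩
  · rintro ⟨i, hi, k, hk, hp⟩
    refine ⟨k, hk, ?_⟩
    rw [PySem.Chars.isIn_iff_infix, infix_iff_prefix_drop_lt (pvKeywords_ne_nil k hk)]
    exact ⟨i, hi, List.isPrefixOf_iff_prefix.mp hp⟩

-- ===== VERDICT (by name: the statement is the Claim_ definition above) =====
theorem extract_materials_py_spec : Claim_equal_extract_materials_py := by
  intro tags _
  unfold Spec_extract_materials_py extract_materials_py extract_materials_py_alt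
  rw [PySem.List.foldl_append_if_eq_filter]
  simp only [cond_eq, List.nil_append]
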